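-- pv_equiv track=rewrite | github.com/MikeF133/AoC-2024 | 3/3_2.py | str_generator
-- ===== SOURCE A (Python) =====
-- def str_generator(s: str):
--     action = 1
--     for i in range(len(s)):
--         if action == 1:
--             yield s[i]
--             if s[i+1:i+8] == "don't()":
--                 action = 0
--         if action == 0:
--             if s[i+1:i+5] == "do()":
--                 action = 1
-- ===== SOURCE B (Python) =====
-- def str_generator(s: str):
--     # find-based marker scanner: jump between don't()/do() markers instead of
--     # checking a fixed-width slice at every index
--     start = 0
--     while True:
--         d = s.find("don't()", start + 1)
--         if d == -1:
--             yield from s[start:]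
--             return
--         yield from s[start:d]
--         e = s.find("do()", d + 1)
--         if e == -1:
--             return
--         start = e
-- ===== Notes on version B (the rewrite author's own statement) =====
-- stated objective: faster
-- what changed: Replaces the per-index state machine that compares a 7-char slice at every position with a scanner that jumps between markers via str.find and yields whole segments.
import Mathlib
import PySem

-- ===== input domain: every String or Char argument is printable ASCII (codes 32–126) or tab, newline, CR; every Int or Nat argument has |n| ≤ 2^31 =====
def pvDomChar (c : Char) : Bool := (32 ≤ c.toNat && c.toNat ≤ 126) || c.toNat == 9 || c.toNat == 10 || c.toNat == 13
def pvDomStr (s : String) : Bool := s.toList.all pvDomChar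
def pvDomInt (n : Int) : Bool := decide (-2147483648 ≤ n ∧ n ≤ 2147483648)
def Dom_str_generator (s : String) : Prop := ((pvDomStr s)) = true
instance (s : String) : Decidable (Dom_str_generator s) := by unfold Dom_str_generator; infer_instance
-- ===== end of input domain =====

-- B replaces A's per-index state machine (a 7-char slice comparison at every position) by a
-- scanner that jumps between "don't()"/"do()" markers with str.find and yields whole segments.

-- ===== PORT A =====
-- one iteration of A's for-loop: state = (action, chars yielded so far)
def strGenStepA (cs : List Char) (st : Int × List String) (i : Int) : Int × List String :=
  let st1 : Int × List String :=
    if st.1 == 1 then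
      let out := st.2 ++ [String.ofList [PySem.List.pyGetD cs i ' ']]   -- yield s[i]  (i ∈ range(len(s)), always in range)
      if PySem.List.slice cs (some (i + 1)) (some (i + 8)) = "don't()".toList then (0, out) else (1, out)
    else st
  if st1.1 == 0 then
    if PySem.List.slice cs (some (i + 1)) (some (i + 5)) = "do()".toList then (1, st1.2) else st1
  else st1

def str_generator (s : String) : List String :=
  ((PySem.List.pyRange 0 (PySem.Str.len s) 1).foldl (strGenStepA s.toList) (1, [])).2

-- ===== PORT B =====
-- Source B's while-loop; `start` strictly increases every round, so `len(s)+1` rounds always suffice (fuel)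
def strGenLoopB (cs : List Char) (start : Int) : Nat → List String
  | 0 => []
  | f + 1 =>
    let d := PySem.Chars.findFrom cs "don't()".toList (start + 1) none
    if d = -1 then
      (PySem.List.slice cs (some start) none).map (fun c => String.ofList [c])   -- yield from s[start:]
    else
      ((PySem.List.slice cs (some start) (some d)).map (fun c => String.ofList [c])) ++  -- yield from s[start:d]
      (let e := PySem.Chars.findFrom cs "do()".toList (d + 1) none
       if e = -1 then [] else strGenLoopB cs e f)

def str_generator_alt (s : String) : List String :=
  strGenLoopB s.toList 0 (s.toList.length + 1)

-- ===== PRECONDITION & SPEC =====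
def Spec_str_generator (s : String) (out : List String) : Prop := out = str_generator_alt s
instance (s : String) (out : List String) : Decidable (Spec_str_generator s out) := by unfold Spec_str_generator; infer_instance

-- ===== CLAIM (what is proved, stated in full; the proofs are below) =====
def Claim_equal_str_generator : Prop := ∀ (s : String), Dom_str_generator s → Spec_str_generator s (str_generator s)

-- ===== LEMMAS AND PROOFS =====

-- A's loop tail starting at index i with a given action, collecting into an empty accumulator
def runA (cs : List Char) (a : Int) (i : Nat) : List String :=
  ((PySem.List.pyRange (i : Int) (cs.length : Int) 1).foldl (strGenStepA cs) (a, [])).2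

-- B's off-phase tail: the do()-search Source B performs after yielding up to a don't() at position j
def offTailB (cs : List Char) (j : Nat) (f : Nat) : List String :=
  let e := PySem.Chars.findFrom cs "do()".toList ((j : Int) + 1) none
  if e = -1 then [] else strGenLoopB cs e f

lemma stepA_out (cs : List Char) (a : Int) (out : List String) (x : Int) :
    strGenStepA cs (a, out) x =
      ((strGenStepA cs (a, []) x).1, out ++ (strGenStepA cs (a, []) x).2) := by
  unfold strGenStepA
  by_cases h1 : a == 1 <;> simp [h1] <;> split_ifs <;> simp

lemma foldl_out (cs : List Char) (r : List Int) : ∀ (a : Int) (out : List String),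
    (r.foldl (strGenStepA cs) (a, out)).2 = out ++ (r.foldl (strGenStepA cs) (a, [])).2 := by
  induction r with
  | nil => intro a out; simp
  | cons x r ih =>
    intro a out
    simp only [List.foldl_cons]
    rw [stepA_out cs a out x]
    rw [ih _ (out ++ (strGenStepA cs (a, []) x).2)]
    rw [ih ((strGenStepA cs (a, []) x).1) ((strGenStepA cs (a, []) x).2)]
    simp

-- "don't()" and "do()" cannot both start at the same position
lemma no_do_of_dont (l : List Char) (h : "don't()".toList <+: l) : ¬ "do()".toList <+: l := by
  intro h4
  rw [List.prefix_iff_eq_take] at h h4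
  have l4 : ("do()".toList).length = 4 := by decide
  have l7 : ("don't()".toList).length = 7 := by decide
  rw [l4] at h4; rw [l7] at h
  have : "do()".toList = List.take 4 ("don't()".toList) := by
    rw [h4, h, List.take_take]; norm_num
  exact absurd this (by decide)

lemma take_eq_iff_prefix (l sub : List Char) (L : Nat) (hL : sub.length = L) :
    (List.take L l = sub) ↔ sub <+: l := by
  rw [List.prefix_iff_eq_take, hL, eq_comm]

-- nothing is found when the search starts past the end of the string
lemma findFrom_past (cs sub : List Char) (k : Int) (h0 : 0 ≤ k) (h : (cs.length : Int) < k) :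
    PySem.Chars.findFrom cs sub k none = -1 := by
  have hst : ¬ k < 0 := not_lt.mpr h0
  simp only [PySem.Chars.findFrom]
  rw [if_neg hst, if_pos h]

-- the pattern occurs right at the search start: find returns the start
lemma findFrom_at (cs sub : List Char) (k : Nat) (hk : k ≤ cs.length)
    (h : sub <+: cs.drop k) : PySem.Chars.findFrom cs sub (k : Int) none = (k : Int) := by
  rw [PySem.Chars.findFrom_natCast cs sub k hk]
  have hnn : (0:Int) ≤ PySem.Chars.find (cs.drop k) sub :=
    (PySem.Chars.find_nonneg_iff _ _).mpr h.isInfix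
  have hz : PySem.Chars.find (cs.drop k) sub = 0 := by
    rcases PySem.Chars.find_spec hnn with ⟨-, hmin⟩
    by_contra hne
    exact hmin 0 (by omega) (by simpa using h)
  simp [hz]

-- a successful find: the result is a Nat ≥ the search start, the pattern sits there and fits
lemma findFrom_found (cs sub : List Char) (k : Nat) (hk : k ≤ cs.length) (hsub : sub ≠ [])
    (h : PySem.Chars.findFrom cs sub (k : Int) none ≠ -1) :
    ∃ m : Nat, PySem.Chars.findFrom cs sub (k : Int) none = (m : Int) ∧ k ≤ m ∧
      sub <+: cs.drop m ∧ m + sub.length ≤ cs.length := by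
  obtain ⟨hge, hpre, -⟩ := PySem.Chars.findFrom_natCast_spec cs sub k hk h
  set d := PySem.Chars.findFrom cs sub (k : Int) none with hd
  have hlen := hpre.length_le
  have hpos : 0 < sub.length := List.length_pos_of_ne_nil hsub
  simp [List.length_drop] at hlen
  exact ⟨d.toNat, by omega, by omega, hpre, by omega⟩

-- one step of Chars.find when there is no occurrence at position 0
lemma find_cons_step (c : Char) (cs sub : List Char) (h : ¬ sub <+: (c :: cs)) :
    PySem.Chars.find (c :: cs) sub =
      if PySem.Chars.find cs sub = -1 then -1 else PySem.Chars.find cs sub + 1 := by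
  by_cases hcs : PySem.Chars.find cs sub = -1
  · rw [if_pos hcs]
    rw [PySem.Chars.find_eq_neg_one_iff] at hcs ⊢
    intro hin
    rcases List.infix_cons_iff.mp hin with hp | hi
    · exact h hp
    · exact hcs hi
  · rw [if_neg hcs]
    have hnn : (0:Int) ≤ PySem.Chars.find cs sub := by
      have := PySem.Chars.neg_one_le_find cs sub; omega
    obtain ⟨hpre, hmin⟩ := PySem.Chars.find_spec hnn
    set m := (PySem.Chars.find cs sub).toNat with hm
    have hnn2 : (0:Int) ≤ PySem.Chars.find (c :: cs) sub :=
      (PySem.Chars.find_nonneg_iff _ _).mpr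
        (List.infix_cons_iff.mpr (Or.inr ((PySem.Chars.find_nonneg_iff _ _).mp hnn)))
    obtain ⟨hpre2, hmin2⟩ := PySem.Chars.find_spec hnn2
    set f := (PySem.Chars.find (c :: cs) sub).toNat with hf
    have hfle : f ≤ m + 1 := by
      by_contra hgt
      exact hmin2 (m + 1) (by omega) (by simpa using hpre)
    have hfge : m + 1 ≤ f := by
      rcases Nat.eq_zero_or_pos f with h0 | hposf
      · rw [h0] at hpre2; simp at hpre2; exact absurd hpre2 h
      · by_contra hlt
        have hf1 : (f - 1) + 1 = f := by omega
        rw [← hf1] at hpre2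
        simp only [List.drop_succ_cons] at hpre2
        exact hmin (f - 1) (by omega) hpre2
    have hfm : f = m + 1 := by omega
    have hval : PySem.Chars.find (c :: cs) sub = (f : Int) := by rw [hf]; omega
    rw [hval, hfm, hm]
    omega

-- no occurrence at the search start: searching from k and from k+1 agree
lemma findFrom_step (cs sub : List Char) (k : Nat) (hk : k ≤ cs.length) (hsub : sub ≠ [])
    (h : ¬ sub <+: cs.drop k) :
    PySem.Chars.findFrom cs sub (k : Int) none = PySem.Chars.findFrom cs sub ((k : Int) + 1) none := by
  rcases Nat.eq_or_lt_of_le hk with heq | hlt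
  · have h1 : PySem.Chars.findFrom cs sub ((k:Int) + 1) none = -1 :=
      findFrom_past cs sub _ (by omega) (by omega)
    rw [h1, PySem.Chars.findFrom_natCast cs sub k hk]
    have hnl : cs.drop k = [] := by rw [heq]; simp
    rw [hnl]
    have hnil : PySem.Chars.find ([] : List Char) sub = -1 := by
      rw [PySem.Chars.find_eq_neg_one_iff]
      intro hin
      exact hsub (List.eq_nil_of_infix_nil hin)
    simp [hnil]
  · have hk1 : k + 1 ≤ cs.length := hlt
    have hc : ((k:Int) + 1) = ((k+1 : Nat) : Int) := by push_cast; ring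
    rw [PySem.Chars.findFrom_natCast cs sub k hk, hc,
        PySem.Chars.findFrom_natCast cs sub (k+1) hk1]
    have hdrop : cs.drop k = cs[k] :: cs.drop (k+1) := List.drop_eq_getElem_cons hlt
    rw [hdrop, find_cons_step _ _ _ (by rw [← hdrop]; exact h)]
    by_cases hfin : PySem.Chars.find (cs.drop (k+1)) sub = -1
    · simp [hfin]
    · have := PySem.Chars.neg_one_le_find (cs.drop (k+1)) sub
      rw [if_neg hfin, if_neg (by omega), if_neg hfin]
      push_cast
      ring

-- evaluating one A-step in the ON phase (action = 1)
lemma stepA_on (cs : List Char) (i : Nat) (hi : i < cs.length) :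
    strGenStepA cs (1, []) (i : Int) =
      if "don't()".toList <+: cs.drop (i + 1) then (0, [String.ofList [cs[i]]])
      else (1, [String.ofList [cs[i]]]) := by
  have c1 : ((i:Int) + 1) = ((i + 1 : Nat) : Int) := by push_cast; ring
  have c8 : ((i:Int) + 8) = ((i + 8 : Nat) : Int) := by push_cast; ring
  have c5 : ((i:Int) + 5) = ((i + 5 : Nat) : Int) := by push_cast; ring
  unfold strGenStepA
  simp only [c1, c8, c5, PySem.List.slice_natCast, PySem.List.pyGetD_natCast, beq_self_eq_true,
    if_true, List.nil_append, show i + 8 - (i + 1) = 7 from by omega,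
    show i + 5 - (i + 1) = 4 from by omega, List.getD_eq_getElem cs ' ' hi]
  by_cases h7 : "don't()".toList <+: cs.drop (i + 1)
  · rw [if_pos ((take_eq_iff_prefix _ _ 7 (by decide)).mpr h7), if_pos h7]
    simp only [beq_self_eq_true, if_true]
    rw [if_neg (fun hc => no_do_of_dont _ h7 ((take_eq_iff_prefix _ _ 4 (by decide)).mp hc))]
  · rw [if_neg (fun hc => h7 ((take_eq_iff_prefix _ _ 7 (by decide)).mp hc)), if_neg h7]
    simp

-- evaluating one A-step in the OFF phase (action = 0)
lemma stepA_off (cs : List Char) (j : Nat) :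
    strGenStepA cs (0, []) (j : Int) =
      if "do()".toList <+: cs.drop (j + 1) then ((1 : Int), ([] : List String))
      else (0, []) := by
  have c1 : ((j:Int) + 1) = ((j + 1 : Nat) : Int) := by push_cast; ring
  have c5 : ((j:Int) + 5) = ((j + 5 : Nat) : Int) := by push_cast; ring
  unfold strGenStepA
  simp only [c1, c5, PySem.List.slice_natCast, show j + 5 - (j + 1) = 4 from by omega]
  by_cases h4 : "do()".toList <+: cs.drop (j + 1)
  · rw [if_pos ((take_eq_iff_prefix _ _ 4 (by decide)).mpr h4), if_pos h4]
    simp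
  · rw [if_neg (fun hc => h4 ((take_eq_iff_prefix _ _ 4 (by decide)).mp hc)), if_neg h4]
    simp

-- the joint induction: ON-phase (action = 1) matches a fresh unrolling of B's loop,
-- OFF-phase (action = 0) matches B's do()-search tail; induction on cs.length - i
lemma main_ind (cs : List Char) : ∀ (k : Nat),
    (∀ (f i : Nat), i ≤ cs.length → cs.length - i = k → cs.length - i < f →
      runA cs 1 i = strGenLoopB cs (i : Int) f) ∧
    (∀ (f j : Nat), j ≤ cs.length → cs.length - j = k → cs.length - j ≤ f →
      runA cs 0 j = offTailB cs j f) := by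
  intro k
  induction k with
  | zero =>
    constructor
    · intro f i hi hk hf
      have hin : i = cs.length := by omega
      subst hin
      obtain ⟨f', rfl⟩ : ∃ f', f = f' + 1 := ⟨f - 1, by omega⟩
      have hd : PySem.Chars.findFrom cs "don't()".toList ((cs.length : Int) + 1) none = -1 :=
        findFrom_past _ _ _ (by omega) (by omega)
      have hr : PySem.List.pyRange ((cs.length : Nat) : Int) (cs.length : Int) 1 = [] :=
        PySem.List.pyRange_one_eq_nil (le_refl _)
      simp only [runA, hr, List.foldl_nil]
      simp only [strGenLoopB]
      rw [hd, if_pos rfl, PySem.List.slice_from_natCast, List.drop_length, List.map_nil]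
    · intro f j hj hk hf
      have hin : j = cs.length := by omega
      subst hin
      have he : PySem.Chars.findFrom cs "do()".toList ((cs.length : Int) + 1) none = -1 :=
        findFrom_past _ _ _ (by omega) (by omega)
      have hr : PySem.List.pyRange ((cs.length : Nat) : Int) (cs.length : Int) 1 = [] :=
        PySem.List.pyRange_one_eq_nil (le_refl _)
      simp only [runA, hr, List.foldl_nil]
      simp only [offTailB]
      rw [he, if_pos rfl]
  | succ k ih =>
    obtain ⟨ihOn, ihOff⟩ := ih
    constructor
    · -- ON phase
      intro f i hi hk hf
      have hilt : i < cs.length := by omega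
      obtain ⟨f', rfl⟩ : ∃ f', f = f' + 1 := ⟨f - 1, by omega⟩
      have c1 : ((i:Int) + 1) = ((i + 1 : Nat) : Int) := by push_cast; ring
      have hcons : PySem.List.pyRange (i:Int) (cs.length:Int) 1
          = (i:Int) :: PySem.List.pyRange ((i:Int)+1) (cs.length:Int) 1 :=
        PySem.List.pyRange_one_cons (by exact_mod_cast hilt)
      unfold runA
      rw [hcons]
      simp only [List.foldl_cons]
      rw [stepA_on cs i hilt]
      by_cases h7 : "don't()".toList <+: cs.drop (i + 1)
      · rw [if_pos h7, foldl_out, c1]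
        have hA : ((PySem.List.pyRange ((i+1 : Nat):Int) (cs.length:Int) 1).foldl
            (strGenStepA cs) (0, [])).2 = offTailB cs (i+1) f' :=
          ihOff f' (i+1) (by omega) (by omega) (by omega)
        rw [hA]
        have hd : PySem.Chars.findFrom cs "don't()".toList (((i+1:Nat)):Int) none
            = ((i+1:Nat):Int) := findFrom_at _ _ (i+1) (by omega) h7
        have hslice : PySem.List.slice cs (some (i:Int)) (some ((i+1:Nat):Int)) = [cs[i]] := by
          rw [PySem.List.slice_natCast, show i+1-i = 1 from by omega]
          exact List.take_one_drop_eq_of_lt_length hilt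
        simp only [strGenLoopB, c1, hd]
        rw [if_neg (show ((i+1:Nat):Int) ≠ -1 by omega)]
        rw [hslice]
        simp [offTailB]
      · rw [if_neg h7, foldl_out, c1]
        have hA : ((PySem.List.pyRange ((i+1 : Nat):Int) (cs.length:Int) 1).foldl
            (strGenStepA cs) (1, [])).2 = strGenLoopB cs ((i+1:Nat):Int) (f'+1) :=
          ihOn (f'+1) (i+1) (by omega) (by omega) (by omega)
        rw [hA]
        have hstep : PySem.Chars.findFrom cs "don't()".toList ((i+1:Nat):Int) none
            = PySem.Chars.findFrom cs "don't()".toList (((i+1:Nat):Int)+1) none :=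
          findFrom_step cs _ (i+1) (by omega) (by decide) h7
        simp only [strGenLoopB, c1, hstep]
        by_cases hd : PySem.Chars.findFrom cs "don't()".toList (((i+1:Nat):Int)+1) none = -1
        · rw [if_pos hd, if_pos hd]
          rw [PySem.List.slice_from_natCast, PySem.List.slice_from_natCast,
              List.drop_eq_getElem_cons hilt, List.map_cons]
          rfl
        · rw [if_neg hd, if_neg hd]
          have hd' : PySem.Chars.findFrom cs "don't()".toList ((i+1:Nat):Int) none ≠ -1 := by
            rw [hstep]; exact hd
          obtain ⟨m, hm, hge, -, -⟩ := findFrom_found cs _ (i+1) (by omega) (by decide) hd'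
          have hm' : PySem.Chars.findFrom cs "don't()".toList (((i+1:Nat):Int)+1) none
              = ((m:Nat):Int) := by rw [← hstep]; exact hm
          rw [hm']
          have hsplit : PySem.List.slice cs (some (i:Int)) (some ((m:Nat):Int))
              = cs[i] :: PySem.List.slice cs (some ((i+1:Nat):Int)) (some ((m:Nat):Int)) := by
            rw [PySem.List.slice_natCast, PySem.List.slice_natCast, show m - i = (m - (i+1)) + 1 from by omega,
                List.drop_eq_getElem_cons hilt, List.take_succ_cons]
          rw [hsplit]
          simp
    · -- OFF phase
      intro f j hj hk hf
      have hjlt : j < cs.length := by omega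
      have c1 : ((j:Int) + 1) = ((j + 1 : Nat) : Int) := by push_cast; ring
      have hcons : PySem.List.pyRange (j:Int) (cs.length:Int) 1
          = (j:Int) :: PySem.List.pyRange ((j:Int)+1) (cs.length:Int) 1 :=
        PySem.List.pyRange_one_cons (by exact_mod_cast hjlt)
      unfold runA offTailB
      rw [hcons]
      simp only [List.foldl_cons]
      rw [stepA_off cs j]
      by_cases h4 : "do()".toList <+: cs.drop (j + 1)
      · rw [if_pos h4, c1]
        have he : PySem.Chars.findFrom cs "do()".toList ((j+1:Nat):Int) none
            = ((j+1:Nat):Int) := findFrom_at _ _ (j+1) (by omega) h4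
        rw [he, if_neg (show ((j+1:Nat):Int) ≠ -1 by omega)]
        exact ihOn f (j+1) (by omega) (by omega) (by omega)
      · rw [if_neg h4, c1]
        have hstep : PySem.Chars.findFrom cs "do()".toList ((j+1:Nat):Int) none
            = PySem.Chars.findFrom cs "do()".toList (((j+1:Nat):Int)+1) none :=
          findFrom_step cs _ (j+1) (by omega) (by decide) h4
        rw [hstep]
        have := ihOff f (j+1) (by omega) (by omega) (by omega)
        unfold runA offTailB at this
        exact this

-- ===== VERDICT (by name: the statement is the Claim_ definition above) =====
theorem str_generator_spec : Claim_equal_str_generator := by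
  intro s _
  unfold Spec_str_generator str_generator str_generator_alt
  have h := (main_ind s.toList (s.toList.length - 0)).1 (s.toList.length + 1) 0
    (Nat.zero_le _) rfl (by omega)
  simpa [runA, PySem.Str.len_eq] using h
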